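-- pv_equiv track=rewrite | github.com/volpertinger/TowerPuzzle | TowerPuzzle.py | __get_right_vector_from_possible
-- ===== SOURCE A (Python) =====
-- def __get_right_vector_from_possible(lhs_visibility, rhs_visibility, matrix):
--     result = []
--     for vector in matrix:
--         max_height_lhs = 0
--         max_height_rhs = 0
--         current_lhs_visibility = 0
--         current_rhs_visibility = 0
--         unique_array = []
--         for i in range(len(vector)):
--             if unique_array.count(int(vector[i])) == 0:
--                 unique_array.append(int(vector[i]))
--             if int(vector[i]) > max_height_lhs:
--                 current_lhs_visibility += 1
--                 max_height_lhs = int(vector[i])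
--             if int(vector[len(vector) - 1 - i]) > max_height_rhs:
--                 current_rhs_visibility += 1
--                 max_height_rhs = int(vector[len(vector) - 1 - i])
--         unique_array.sort()
--         if ((lhs_visibility == current_lhs_visibility) or (lhs_visibility == 0)) and (
--                 (rhs_visibility == current_rhs_visibility) or (rhs_visibility == 0)) and (
--                 len(unique_array) == len(vector)):
--             result.append(vector)
--     return result
-- ===== SOURCE B (Python) =====
-- def __get_right_vector_from_possible(lhs_visibility, rhs_visibility, matrix):
--     def records(xs):
--         # number of visible towers from the left: the first positive height is
--         # visible; every tower it hides is discarded and the rest is handled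
--         # recursively (no running maximum, no indices)
--         if not xs:
--             return 0
--         h = xs[0]
--         return (1 if h > 0 else 0) + records([x for x in xs[1:] if x > h and x > 0])
--
--     def ok(vector):
--         ints = [int(x) for x in vector]
--         s = sorted(ints)
--         return (lhs_visibility == records(ints) or lhs_visibility == 0) and \
--                (rhs_visibility == records(list(reversed(ints))) or rhs_visibility == 0) and \
--                all(a < b for a, b in zip(s, s[1:]))
--
--     return [vector for vector in matrix if ok(vector)]
-- ===== Notes on version B (the rewrite author's own statement) =====
-- stated objective: alternative
-- what changed: Visibility is computed by a recursive discard-the-hidden algorithm (count the first positive height, recurse on the towers strictly taller than it) instead of a fused indexed loop with running maxima, and uniqueness by strict adjacent increase in the sorted row instead of a manual duplicate list rebuilt with list.count per element; filtering is a comprehension over the rows.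
import Mathlib
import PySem

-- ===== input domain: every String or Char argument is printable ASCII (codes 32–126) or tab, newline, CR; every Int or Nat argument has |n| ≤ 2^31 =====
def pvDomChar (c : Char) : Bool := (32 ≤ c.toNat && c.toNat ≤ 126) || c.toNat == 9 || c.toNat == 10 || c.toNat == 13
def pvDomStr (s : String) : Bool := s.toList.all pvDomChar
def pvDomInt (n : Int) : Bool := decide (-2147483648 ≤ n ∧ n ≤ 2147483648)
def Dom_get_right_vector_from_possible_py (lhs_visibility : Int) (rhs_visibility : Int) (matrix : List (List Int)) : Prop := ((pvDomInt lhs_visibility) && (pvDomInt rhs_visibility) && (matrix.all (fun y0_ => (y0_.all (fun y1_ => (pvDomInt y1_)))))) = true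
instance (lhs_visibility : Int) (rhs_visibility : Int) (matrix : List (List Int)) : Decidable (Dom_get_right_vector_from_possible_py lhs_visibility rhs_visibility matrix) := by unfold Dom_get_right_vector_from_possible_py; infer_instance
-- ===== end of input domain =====

-- B computes visibility by a recursive discard-the-hidden algorithm (count the first positive
-- height, recurse on the strictly taller remainder) and checks uniqueness by strict adjacent
-- increase in the sorted row (objective: alternative).

-- ===== PORT A =====
-- State of A's inner loop: ((max_height_lhs, current_lhs_visibility),
--                           (max_height_rhs, current_rhs_visibility), unique_array).
-- vector[i] / vector[len(vector)-1-i] with i in range(len(vector)) are always in range,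
-- so List.getD is exact here.
def get_right_vector_from_possible_py (lhs_visibility : Int) (rhs_visibility : Int) (matrix : List (List Int)) : List (List Int) :=
  matrix.foldl (fun result vector =>
    let st := (List.range vector.length).foldl
      (fun (st : (Int × Int) × (Int × Int) × List Int) i =>
        let x := vector.getD i 0                       -- int(vector[i]) (identity on ints)
        let unique_array := if st.2.2.count x == 0 then st.2.2 ++ [x] else st.2.2
        let lhs := if x > st.1.1 then (x, st.1.2 + 1) else st.1
        let y := vector.getD (vector.length - 1 - i) 0 -- int(vector[len(vector)-1-i])
        let rhs := if y > st.2.1.1 then (y, st.2.1.2 + 1) else st.2.1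
        (lhs, rhs, unique_array))
      ((0, 0), (0, 0), [])
    let unique_array := PySem.List.sorted st.2.2 (fun x => x) false
    if ((lhs_visibility == st.1.2) || (lhs_visibility == 0)) &&
       ((rhs_visibility == st.2.1.2) || (rhs_visibility == 0)) &&
       (unique_array.length == vector.length)
    then result ++ [vector] else result) []

-- ===== PORT B =====
-- records(xs): the first positive height is visible; every tower it hides is dropped
-- and the rest handled recursively.
def pvRecords : List Int → Int
  | [] => 0
  | h :: t =>
      (if h > 0 then 1 else 0) +
        pvRecords (t.filter (fun x => decide (h < x) && decide (0 < x)))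
termination_by xs => xs.length
decreasing_by
  simp only [List.length_cons, List.length_unattach]
  exact Nat.lt_succ_of_le ((List.length_filter_le _ _).trans (by simp))

def get_right_vector_from_possible_py_alt (lhs_visibility : Int) (rhs_visibility : Int) (matrix : List (List Int)) : List (List Int) :=
  matrix.filter (fun vector =>
    let ints := vector.map (fun x => x)               -- [int(x) for x in vector] (identity on ints)
    let s := PySem.List.sorted ints (fun x => x) false
    ((lhs_visibility == pvRecords ints) || (lhs_visibility == 0)) &&
    ((rhs_visibility == pvRecords ints.reverse) || (rhs_visibility == 0)) &&
    ((s.zip (PySem.List.slice s (some 1) none)).all (fun p => decide (p.1 < p.2))))  -- zip(s, s[1:])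

-- ===== PRECONDITION & SPEC =====
def Spec_get_right_vector_from_possible_py (lhs_visibility : Int) (rhs_visibility : Int) (matrix : List (List Int)) (out : List (List Int)) : Prop := out = get_right_vector_from_possible_py_alt lhs_visibility rhs_visibility matrix
instance (lhs_visibility : Int) (rhs_visibility : Int) (matrix : List (List Int)) (out : List (List Int)) : Decidable (Spec_get_right_vector_from_possible_py lhs_visibility rhs_visibility matrix out) := by unfold Spec_get_right_vector_from_possible_py; infer_instance

-- ===== CLAIM (what is proved, stated in full; the proofs are below) =====
def Claim_equal_get_right_vector_from_possible_py : Prop := ∀ (lhs_visibility : Int) (rhs_visibility : Int) (matrix : List (List Int)), Dom_get_right_vector_from_possible_py lhs_visibility rhs_visibility matrix → Spec_get_right_vector_from_possible_py lhs_visibility rhs_visibility matrix (get_right_vector_from_possible_py lhs_visibility rhs_visibility matrix)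

-- ===== LEMMAS AND PROOFS =====

-- A fold over range(len(v)) reading v[i] is a fold over v.
theorem foldl_range_getD {σ : Type} (v : List Int) (f : σ → Int → σ) (init : σ) :
    (List.range v.length).foldl (fun s i => f s (v.getD i 0)) init = v.foldl f init := by
  induction v using List.reverseRecOn generalizing init with
  | nil => rfl
  | append_singleton w a ih =>
      have hlen : (w ++ [a]).length = w.length + 1 := by simp
      rw [hlen, List.range_succ, List.foldl_append, List.foldl_append]
      have h1 : (List.range w.length).foldl (fun s i => f s ((w ++ [a]).getD i 0)) init
          = (List.range w.length).foldl (fun s i => f s (w.getD i 0)) init := by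
        apply PySem.List.foldl_congr_mem
        intro acc x hx
        have hx' : x < w.length := List.mem_range.mp hx
        simp [List.getD, List.getElem?_append_left, hx']
      rw [h1, ih]
      simp [List.getD]

-- The backward reads v[len(v)-1-i] make it a fold over v.reverse.
theorem foldl_range_getD_rev {σ : Type} (v : List Int) (f : σ → Int → σ) (init : σ) :
    (List.range v.length).foldl (fun s i => f s (v.getD (v.length - 1 - i) 0)) init
      = v.reverse.foldl f init := by
  have h : (List.range v.length).foldl (fun s i => f s (v.getD (v.length - 1 - i) 0)) init
      = (List.range v.length).foldl (fun s i => f s (v.reverse.getD i 0)) init := by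
    apply PySem.List.foldl_congr_mem
    intro acc x hx
    have hx' : x < v.length := List.mem_range.mp hx
    rw [List.getD_reverse x hx']
  rw [h]
  have := foldl_range_getD v.reverse f init
  rw [List.length_reverse] at this
  exact this

-- A's unique_array accumulation is set-insertion.
theorem uniq_fold_eq_ofList (v : List Int) :
    v.foldl (fun ua x => if ua.count x == 0 then ua ++ [x] else ua) []
      = PySem.Set.ofList v := by
  unfold PySem.Set.ofList
  apply PySem.List.foldl_congr_mem
  intro acc x _
  unfold PySem.Set.add
  by_cases h : x ∈ acc
  · have hc : ¬ (acc.count x == 0) = true := by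
      simp [List.count_eq_zero, h]
    simp [hc, h]
  · have hc : (acc.count x == 0) = true := by
      simp [List.count_eq_zero, h]
    simp [hc, h]

-- A's inner loop splits into the three independent accumulations.
theorem inner_fold_eq (v : List Int) :
    (List.range v.length).foldl
      (fun (st : (Int × Int) × (Int × Int) × List Int) i =>
        let x := v.getD i 0
        let unique_array := if st.2.2.count x == 0 then st.2.2 ++ [x] else st.2.2
        let lhs := if x > st.1.1 then (x, st.1.2 + 1) else st.1
        let y := v.getD (v.length - 1 - i) 0
        let rhs := if y > st.2.1.1 then (y, st.2.1.2 + 1) else st.2.1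
        (lhs, rhs, unique_array))
      ((0, 0), (0, 0), [])
    = (v.foldl (fun (st : Int × Int) h => if h > st.1 then (h, st.2 + 1) else st) (0, 0),
       v.reverse.foldl (fun (st : Int × Int) h => if h > st.1 then (h, st.2 + 1) else st) (0, 0),
       PySem.Set.ofList v) := by
  have hstep : (fun (st : (Int × Int) × (Int × Int) × List Int) (i : Nat) =>
        let x := v.getD i 0
        let unique_array := if st.2.2.count x == 0 then st.2.2 ++ [x] else st.2.2
        let lhs := if x > st.1.1 then (x, st.1.2 + 1) else st.1
        let y := v.getD (v.length - 1 - i) 0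
        let rhs := if y > st.2.1.1 then (y, st.2.1.2 + 1) else st.2.1
        (lhs, rhs, unique_array))
      = (fun (st : (Int × Int) × (Int × Int) × List Int) (i : Nat) =>
          (if v.getD i 0 > st.1.1 then (v.getD i 0, st.1.2 + 1) else st.1,
           (if v.getD (v.length - 1 - i) 0 > st.2.1.1 then (v.getD (v.length - 1 - i) 0, st.2.1.2 + 1) else st.2.1,
            if st.2.2.count (v.getD i 0) == 0 then st.2.2 ++ [v.getD i 0] else st.2.2))) := rfl
  rw [hstep,
      PySem.List.foldl_prod_mk
        (f := fun (p : Int × Int) (i : Nat) => if v.getD i 0 > p.1 then (v.getD i 0, p.2 + 1) else p)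
        (g := fun (q : (Int × Int) × List Int) (i : Nat) =>
          (if v.getD (v.length - 1 - i) 0 > q.1.1 then (v.getD (v.length - 1 - i) 0, q.1.2 + 1) else q.1,
           if q.2.count (v.getD i 0) == 0 then q.2 ++ [v.getD i 0] else q.2)),
      PySem.List.foldl_prod_mk
        (f := fun (p : Int × Int) (i : Nat) => if v.getD (v.length - 1 - i) 0 > p.1 then (v.getD (v.length - 1 - i) 0, p.2 + 1) else p)
        (g := fun (ua : List Int) (i : Nat) => if ua.count (v.getD i 0) == 0 then ua ++ [v.getD i 0] else ua)]
  refine congrArg₂ Prod.mk ?_ (congrArg₂ Prod.mk ?_ ?_)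
  · exact foldl_range_getD v (fun p h => if h > p.1 then (h, p.2 + 1) else p) (0, 0)
  · exact foldl_range_getD_rev v (fun p h => if h > p.1 then (h, p.2 + 1) else p) (0, 0)
  · exact (foldl_range_getD v (fun ua x => if ua.count x == 0 then ua ++ [x] else ua) []).trans
      (uniq_fold_eq_ofList v)

-- count accumulator is additive in its second component
theorem fold_snd_add (t : List Int) (m c : Int) :
    (t.foldl (fun (st : Int × Int) h => if h > st.1 then (h, st.2 + 1) else st) (m, c)).2
      = c + (t.foldl (fun (st : Int × Int) h => if h > st.1 then (h, st.2 + 1) else st) (m, 0)).2 := by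
  induction t generalizing m c with
  | nil => simp
  | cons h t ih =>
      by_cases hm : h > m
      · simp only [List.foldl_cons, if_pos hm]
        rw [ih h (c + 1), ih h (0 + 1)]
        ring
      · simp only [List.foldl_cons, if_neg hm]
        exact ih m c

-- A's running-max count from a nonnegative threshold m is pvRecords of the elements above m.
theorem fold_count_eq_records_filter (t : List Int) (m : Int) (hm : 0 ≤ m) :
    (t.foldl (fun (st : Int × Int) h => if h > st.1 then (h, st.2 + 1) else st) (m, 0)).2
      = pvRecords (t.filter (fun x => decide (m < x))) := by
  induction t generalizing m with
  | nil => simp [pvRecords]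
  | cons h t ih =>
      by_cases hmh : m < h
      · have h0 : (0:Int) < h := lt_of_le_of_lt hm hmh
        simp only [List.foldl_cons]
        rw [if_pos (show h > m from hmh), fold_snd_add t h (0 + 1), ih h (le_of_lt h0),
            List.filter_cons_of_pos (by simp [hmh])]
        simp only [pvRecords]
        rw [if_pos h0]
        have hfil : (t.filter (fun x => decide (m < x))).filter
              (fun x => decide (h < x) && decide (0 < x))
            = t.filter (fun x => decide (h < x)) := by
          rw [List.filter_filter]
          apply List.filter_congr
          intro x _
          by_cases hx : h < x
          · simp [hx, lt_trans h0 hx, lt_trans hmh hx]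
          · simp [hx]
        rw [hfil]
        ring
      · simp only [List.foldl_cons]
        rw [if_neg (show ¬ h > m from hmh), List.filter_cons_of_neg (by simp [hmh])]
        exact ih m hm

-- pvRecords ignores non-positive heights.
theorem records_filter_pos (v : List Int) :
    pvRecords (v.filter (fun x => decide ((0:Int) < x))) = pvRecords v := by
  cases v with
  | nil => rfl
  | cons h t =>
      by_cases h0 : (0:Int) < h
      · rw [List.filter_cons_of_pos (by simp [h0])]
        simp only [pvRecords]
        rw [if_pos h0, List.filter_filter]
        congr 2
        apply List.filter_congr
        intro x _
        by_cases hx : h < x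
        · simp [hx, lt_trans h0 hx]
        · simp [hx]
      · rw [List.filter_cons_of_neg (by simp [h0])]
        simp only [pvRecords]
        rw [if_neg h0]
        have hfil : t.filter (fun x => decide (h < x) && decide (0 < x))
            = t.filter (fun x => decide ((0:Int) < x)) := by
          apply List.filter_congr
          intro x _
          by_cases hx : (0:Int) < x
          · simp [hx, lt_of_le_of_lt (le_of_not_gt h0) hx]
          · simp [hx]
        rw [hfil]
        ring

-- A's visibility count is pvRecords.
theorem count_eq_records (v : List Int) :
    (v.foldl (fun (st : Int × Int) h => if h > st.1 then (h, st.2 + 1) else st) (0, 0)).2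
      = pvRecords v := by
  rw [fold_count_eq_records_filter v 0 le_rfl, records_filter_pos]

-- adjacent all-< over zip s (s.tail) is pairwise strict increase
theorem allzip_iff_pairwise : ∀ (s : List Int),
    (((s.zip s.tail).all (fun p => decide (p.1 < p.2))) = true) ↔ s.Pairwise (· < ·)
  | [] => by simp
  | [a] => by simp
  | a :: b :: t => by
      have ih := allzip_iff_pairwise (b :: t)
      simp only [List.tail_cons, List.zip_cons_cons, List.all_cons, Bool.and_eq_true,
        decide_eq_true_eq] at *
      constructor
      · rintro ⟨hab, hrest⟩
        have hp := ih.mp hrest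
        have hb := (List.pairwise_cons.mp hp).1
        refine List.pairwise_cons.mpr ⟨?_, hp⟩
        intro c hc
        rcases List.mem_cons.mp hc with rfl | hct
        · exact hab
        · exact lt_trans hab (hb c hct)
      · intro hp
        have h1 := (List.pairwise_cons.mp hp).1
        exact ⟨h1 b (by simp), ih.mpr (List.pairwise_cons.mp hp).2⟩

-- the deduplicated length equals the length iff the list has no duplicates
theorem ofList_length_eq_iff_nodup (v : List Int) :
    (PySem.Set.ofList v).length = v.length ↔ v.Nodup := by
  constructor
  · intro hlen
    have hperm : (PySem.Set.ofList v).Perm v.dedup := by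
      rw [List.perm_ext_iff_of_nodup (PySem.Set.nodup_ofList v) v.nodup_dedup]
      intro x
      rw [PySem.Set.mem_ofList, List.mem_dedup]
    have hd : v.dedup.length = v.length := by
      rw [← hperm.length_eq, hlen]
    have hdv : v.dedup = v := (List.dedup_sublist v).eq_of_length hd
    rw [← List.dedup_eq_self]
    exact hdv
  · intro hnd
    exact congrArg List.length (PySem.Set.ofList_eq_self_of_nodup v hnd)

-- A's uniqueness test equals B's sorted strict-adjacency test.
theorem unique_bool_eq (v : List Int) :
    ((PySem.List.sorted (PySem.Set.ofList v) (fun x => x) false).length == v.length)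
      = (((PySem.List.sorted v (fun x => x) false).zip
            (PySem.List.slice (PySem.List.sorted v (fun x => x) false) (some 1) none)).all
          (fun p => decide (p.1 < p.2))) := by
  rw [PySem.List.slice_from_one, PySem.List.length_sorted]
  set s := PySem.List.sorted v (fun x => x) false with hs
  have hperm : s.Perm v := PySem.List.sorted_perm v (fun x => x) false
  have h1 : (((s.zip s.tail).all (fun p => decide (p.1 < p.2))) = true) ↔ v.Nodup := by
    rw [allzip_iff_pairwise]
    constructor
    · intro hp
      exact hperm.nodup_iff.mp (hp.imp fun {a b} hab => ne_of_lt hab)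
    · intro hnd
      have hle : s.Pairwise (fun a b => a ≤ b) := PySem.List.sorted_pairwise v (fun x => x)
      have hne : s.Pairwise (fun a b => a ≠ b) := hperm.nodup_iff.mpr hnd
      exact (hle.and hne).imp fun {a b} hab => lt_of_le_of_ne hab.1 hab.2
  have h2 : (((PySem.Set.ofList v).length == v.length) = true) ↔ v.Nodup := by
    rw [beq_iff_eq]
    exact ofList_length_eq_iff_nodup v
  exact Bool.eq_iff_iff.mpr (h2.trans h1.symm)

-- ===== VERDICT (by name: the statement is the Claim_ definition above) =====
theorem get_right_vector_from_possible_py_spec : Claim_equal_get_right_vector_from_possible_py := by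
  intro lhs_visibility rhs_visibility matrix _
  unfold Spec_get_right_vector_from_possible_py
  unfold get_right_vector_from_possible_py get_right_vector_from_possible_py_alt
  rw [PySem.List.foldl_append_if_eq_filter, List.nil_append]
  apply List.filter_congr
  intro v _
  simp only [inner_fold_eq, count_eq_records, List.map_id', unique_bool_eq]
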